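-- pv_equiv track=rewrite | github.com/ladokp/aoc2022 | solution/aoc_day_08.py | _get_left_score
-- ===== SOURCE A (Python) =====
-- def _get_left_score(tree_map, line_index, column_index):
--     current_height = tree_map[line_index][column_index]
--     score = 0
--     if not column_index:
--         return 0
--     for height in reversed(tree_map[line_index][:column_index]):
--         score += 1
--         if height >= current_height:
--             break
--     return score
-- ===== SOURCE B (Python) =====
-- def _get_left_score(tree_map, line_index, column_index):
--     row = tree_map[line_index]
--     current_height = row[column_index]
--     left = row[:column_index]
--     nearest = None
--     for i, height in enumerate(left):
--         if height >= current_height: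
--             nearest = i
--     return len(left) if nearest is None else len(left) - nearest
-- ===== Notes on version B (the rewrite author's own statement) =====
-- stated objective: alternative
-- what changed: Replaces A's reversed increment-and-break loop with a forward single pass over the left prefix (no reversal, no early exit) that remembers the index of the most recent blocking tree, deriving the score arithmetically as len(left) - nearest_index (or len(left) if no blocker).
import Mathlib
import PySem

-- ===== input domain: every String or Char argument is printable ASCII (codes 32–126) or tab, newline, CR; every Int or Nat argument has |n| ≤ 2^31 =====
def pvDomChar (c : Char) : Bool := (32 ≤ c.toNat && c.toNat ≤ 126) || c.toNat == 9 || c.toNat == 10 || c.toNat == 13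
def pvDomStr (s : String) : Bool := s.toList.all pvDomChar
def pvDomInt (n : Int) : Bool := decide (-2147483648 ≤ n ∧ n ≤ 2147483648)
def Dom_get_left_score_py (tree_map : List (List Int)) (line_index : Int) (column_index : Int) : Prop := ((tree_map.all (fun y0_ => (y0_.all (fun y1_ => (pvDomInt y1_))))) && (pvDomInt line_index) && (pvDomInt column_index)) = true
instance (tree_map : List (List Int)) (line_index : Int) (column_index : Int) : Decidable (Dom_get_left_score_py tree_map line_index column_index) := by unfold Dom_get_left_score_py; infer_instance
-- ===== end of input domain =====

-- B scans the left prefix forward (no reversal, no break), tracking the most recent blocker index, and derives the score arithmetically; objective: alternative decomposition, same cost.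

-- ===== PORT A =====
-- A's for-loop with break over the reversed slice: structural recursion carrying the score.
def pvGoA (ts : List Int) (cur : Int) (score : Int) : Int :=
  match ts with
  | [] => score
  | h :: t => if h ≥ cur then score + 1 else pvGoA t cur (score + 1)

def get_left_score_py (tree_map : List (List Int)) (line_index : Int) (column_index : Int) : Int :=
  let row := (PySem.List.pyGet? tree_map line_index).getD []
  let current_height := (PySem.List.pyGet? row column_index).getD 0
  if column_index == 0 then 0
  else pvGoA (PySem.List.slice row none (some column_index)).reverse current_height 0

-- ===== PORT B =====
-- B's forward enumerate loop: a fold carrying (next index, last blocker index).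
def pvStepB (cur : Int) (s : Nat × Option Nat) (h : Int) : Nat × Option Nat :=
  (s.1 + 1, if h ≥ cur then some s.1 else s.2)

def get_left_score_py_alt (tree_map : List (List Int)) (line_index : Int) (column_index : Int) : Int :=
  let row := (PySem.List.pyGet? tree_map line_index).getD []
  let current_height := (PySem.List.pyGet? row column_index).getD 0
  let left := PySem.List.slice row none (some column_index)
  let st := left.foldl (pvStepB current_height) (0, none)
  match st.2 with
  | none => (left.length : Int)
  | some n => (left.length : Int) - (n : Int)

-- ===== PRECONDITION & SPEC =====
-- Exactly where the Python A returns: both indexings succeed (else IndexError).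
def Pre_get_left_score_py (tree_map : List (List Int)) (line_index : Int) (column_index : Int) : Prop :=
  PySem.Raise.InRange tree_map.length line_index ∧
  PySem.Raise.InRange ((PySem.List.pyGet? tree_map line_index).getD []).length column_index
instance (tree_map : List (List Int)) (line_index : Int) (column_index : Int) : Decidable (Pre_get_left_score_py tree_map line_index column_index) := by unfold Pre_get_left_score_py; infer_instance

def pvWitness_get_left_score_py : List (List Int) × Int × Int := ([[3, 1, 2]], 0, 2)

def Spec_get_left_score_py (tree_map : List (List Int)) (line_index : Int) (column_index : Int) (out : Int) : Prop := out = get_left_score_py_alt tree_map line_index column_index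
instance (tree_map : List (List Int)) (line_index : Int) (column_index : Int) (out : Int) : Decidable (Spec_get_left_score_py tree_map line_index column_index out) := by unfold Spec_get_left_score_py; infer_instance

-- ===== CLAIM (what is proved, stated in full; the proofs are below) =====
def Claim_equal_get_left_score_py : Prop := ∀ (tree_map : List (List Int)) (line_index : Int) (column_index : Int), Dom_get_left_score_py tree_map line_index column_index → Pre_get_left_score_py tree_map line_index column_index → Spec_get_left_score_py tree_map line_index column_index (get_left_score_py tree_map line_index column_index)

-- ===== LEMMAS AND PROOFS =====
-- A's count-until-first-blocker on a list equals first-blocker-index + 1 (or length).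
lemma pvGoA_eq_findIdx (ts : List Int) (cur : Int) (s : Int) :
    pvGoA ts cur s = s + (match ts.findIdx? (fun h => h ≥ cur) with
      | none => (ts.length : Int)
      | some k => (k : Int) + 1) := by
  induction ts generalizing s with
  | nil => simp [pvGoA]
  | cons h t ih =>
    by_cases hb : h ≥ cur
    · simp [pvGoA, hb, List.findIdx?_cons]
    · simp only [pvGoA, List.findIdx?_cons, hb, decide_eq_true_eq, if_false, ih]
      cases t.findIdx? (fun h => h ≥ cur) with
      | none => simp; ring
      | some k => simp; ring

lemma findIdx?_lt_length {α : Type} (l : List α) (p : α → Bool) (k : Nat)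
    (h : l.findIdx? p = some k) : k < l.length := by
  rw [List.findIdx?_eq_some_iff_findIdx_eq] at h
  exact h.1

-- B's fold: the last blocker index forward corresponds to the first blocker in the reverse.
lemma foldB_snd (cur : Int) (l : List Int) (i : Nat) (o : Option Nat) :
    (l.foldl (pvStepB cur) (i, o)).2 =
      (match l.reverse.findIdx? (fun h => h ≥ cur) with
        | none => o
        | some k => some (i + l.length - 1 - k)) := by
  induction l using List.reverseRecOn generalizing i o with
  | nil => simp
  | append_singleton l' a ih =>
    rw [List.foldl_append]
    by_cases hp : a ≥ cur
    · simp only [List.foldl_cons, List.foldl_nil, pvStepB, hp, if_pos, List.reverse_append,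
        List.reverse_singleton, List.singleton_append, List.findIdx?_cons, decide_eq_true_eq]
      have h1 : (l'.foldl (pvStepB cur) (i, o)).1 = i + l'.length := by
        clear ih
        induction l' generalizing i o with
        | nil => simp
        | cons b t ih2 => simp [pvStepB, ih2]; omega
      rw [h1]
      simp
    · simp only [List.foldl_cons, List.foldl_nil, pvStepB, hp, if_false, List.reverse_append,
        List.reverse_singleton, List.singleton_append, List.findIdx?_cons, decide_eq_true_eq]
      rw [ih]
      cases hf : l'.reverse.findIdx? (fun h => h ≥ cur) with
      | none => simp
      | some k =>
        have hk : k < l'.length := by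
          have := findIdx?_lt_length _ _ _ hf; simpa using this
        simp only [Option.map_some, List.length_append, List.length_cons, List.length_nil,
          Option.some.injEq]
        omega

-- A's reversed count-to-first-blocker equals B's forward last-blocker arithmetic, for any list.
lemma pvGoA_eq_foldB (left : List Int) (cur : Int) :
    pvGoA left.reverse cur 0 =
      (match (left.foldl (pvStepB cur) (0, none)).2 with
        | none => (left.length : Int)
        | some n => (left.length : Int) - (n : Int)) := by
  rw [pvGoA_eq_findIdx, foldB_snd]
  cases hf : left.reverse.findIdx? (fun h => h ≥ cur) with
  | none => simp
  | some k =>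
    have hk : k < left.length := by
      have := findIdx?_lt_length _ _ _ hf; simpa using this
    simp only [Int.zero_add, Nat.zero_add]
    have h2 : ((left.length - 1 - k : Nat) : Int) = (left.length : Int) - ((k : Int) + 1) := by
      omega
    rw [h2]
    ring

-- ===== VERDICT (by name: the statement is the Claim_ definition above) =====
theorem get_left_score_py_spec : Claim_equal_get_left_score_py := by
  intro tm li ci _ _
  unfold Spec_get_left_score_py get_left_score_py get_left_score_py_alt
  by_cases h0 : ci = 0
  · subst h0
    have hs := PySem.List.slice_to ((PySem.List.pyGet? tm li).getD ([] : List Int)) (le_refl (0:Int))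
    simp [hs]
  · simp only [beq_iff_eq, h0, if_false]
    exact pvGoA_eq_foldB _ _
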